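-- pv_equiv track=rewrite | github.com/zero-j96/Coding_Test | 프로그래머스/1/140108. 문자열 나누기/문자열 나누기.py | solution
-- ===== SOURCE A (Python) =====
-- def solution(s):
--     answer = 0
--     i = 0
--     s1 = ''
--     while i < len(s):
--         s1 += (s[i:i+2])
--         if s1.count(s1[0]) == len(s1) - s1.count(s1[0]):
--             answer += 1
--             s1 = ''
--             i += 2
--         elif (len(s)-2 <= i) &(s1.count(s1[0]) != len(s1) -s1.count(s1[0])):
--             answer += 1
--             i += 2
--         else:
--             i += 2
--     return answer
-- ===== SOURCE B (Python) =====
-- def solution(s):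
--     answer = 0
--     n = len(s)
--     first = None
--     a = b = 0
--     for j, c in enumerate(s):
--         if first is None:
--             first, a, b = c, 1, 0
--         elif c == first:
--             a += 1
--         else:
--             b += 1
--         if j % 2 == 1 or j == n - 1:
--             if a == b:
--                 answer += 1
--                 first = None
--             elif j == n - 1:
--                 answer += 1
--     return answer
-- ===== Notes on version B (the rewrite author's own statement) =====
-- stated objective: faster
-- what changed: Replaced the quadratic loop that re-accumulates a segment string and rescans it with s1.count on every step by a single char-by-char pass that maintains running counts of the segment's first character vs the others, checking balance at the same 2-char checkpoints.
import Mathlib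
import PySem

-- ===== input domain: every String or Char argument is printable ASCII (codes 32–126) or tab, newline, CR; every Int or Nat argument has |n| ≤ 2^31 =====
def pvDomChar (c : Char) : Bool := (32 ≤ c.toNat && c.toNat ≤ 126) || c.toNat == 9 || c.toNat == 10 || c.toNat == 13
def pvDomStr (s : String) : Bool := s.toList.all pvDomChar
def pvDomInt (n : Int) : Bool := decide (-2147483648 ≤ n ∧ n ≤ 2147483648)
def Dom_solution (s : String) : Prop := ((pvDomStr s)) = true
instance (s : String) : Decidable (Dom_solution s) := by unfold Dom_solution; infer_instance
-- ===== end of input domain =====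

-- B replaces A's quadratic segment-string accumulation + rescans by one linear pass with running counts.

-- ===== PORT A =====
-- A's while loop: state (i, s1, answer); s[i:i+2] with 0 ≤ i is (cs.drop i).take 2 (exact);
-- s1.count(s1[0]) on a single char equals List.count of the head (s1 is nonempty at that point;
-- headD ' ' is a placeholder never hit); Python's `len(s)-2 <= i` ⇔ Nat `cs.length - 2 ≤ i` for i ≥ 0.
def solLoopA (cs : List Char) (i : Nat) (s1 : List Char) (answer : Int) : Int :=
  if _h : i < cs.length then
    let s1' := s1 ++ (cs.drop i).take 2
    let c0 := s1'.headD ' '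
    let cnt := s1'.count c0
    if cnt = s1'.length - cnt then
      solLoopA cs (i + 2) [] (answer + 1)
    else if cs.length - 2 ≤ i ∧ cnt ≠ s1'.length - cnt then
      solLoopA cs (i + 2) s1' (answer + 1)
    else
      solLoopA cs (i + 2) s1' answer
  else answer
termination_by cs.length - i
decreasing_by all_goals exact Nat.sub_lt_sub_left _h (Nat.lt_add_of_pos_right (Nat.succ_pos 1))

def solution (s : String) : Int := solLoopA s.toList 0 [] 0

-- ===== PORT B =====
-- B's for loop over enumerate(s): state (first, a, b, answer); checkpoint at odd j or last index.
def stepB (first : Option Char) (a b : Nat) (c : Char) : Option Char × Nat × Nat :=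
  match first with
  | none => (some c, 1, 0)
  | some f => if c = f then (some f, a + 1, b) else (some f, a, b + 1)

def solLoopB (cs : List Char) (j n : Nat) (first : Option Char) (a b : Nat) (answer : Int) : Int :=
  match cs with
  | [] => answer
  | c :: rest =>
    let first' := (stepB first a b c).1
    let a' := (stepB first a b c).2.1
    let b' := (stepB first a b c).2.2
    if j % 2 = 1 ∨ j = n - 1 then
      if a' = b' then solLoopB rest (j + 1) n none a' b' (answer + 1)
      else if j = n - 1 then solLoopB rest (j + 1) n first' a' b' (answer + 1)
      else solLoopB rest (j + 1) n first' a' b' answer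
    else solLoopB rest (j + 1) n first' a' b' answer

def solution_alt (s : String) : Int := solLoopB s.toList 0 s.toList.length none 0 0 0

-- ===== PRECONDITION & SPEC =====
def Spec_solution (s : String) (out : Int) : Prop := out = solution_alt s
instance (s : String) (out : Int) : Decidable (Spec_solution s out) := by unfold Spec_solution; infer_instance

-- ===== CLAIM (what is proved, stated in full; the proofs are below) =====
def Claim_equal_solution : Prop := ∀ (s : String), Dom_solution s → Spec_solution s (solution s)

-- ===== LEMMAS AND PROOFS =====

-- (first, a, b) abstracts the segment string s1: first is its head, a the count of the head, b the rest.
def AbsOK (s1 : List Char) (first : Option Char) (a b : Nat) : Prop :=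
  match s1 with
  | [] => first = none
  | c :: _ => first = some c ∧ a = s1.count c ∧ b = s1.length - s1.count c

theorem step_abs (s1 : List Char) (first : Option Char) (a b : Nat) (c : Char)
    (h : AbsOK s1 first a b) :
    AbsOK (s1 ++ [c]) (stepB first a b c).1 (stepB first a b c).2.1 (stepB first a b c).2.2 := by
  cases s1 with
  | nil =>
    simp only [AbsOK] at h
    subst h
    simp [AbsOK, stepB]
  | cons c0 t =>
    obtain ⟨h1, h2, h3⟩ := h
    subst h1
    have hle : (c0 :: t).count c0 ≤ (c0 :: t).length := List.count_le_length
    by_cases hc : c = c0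
    · have hcnt : ((c0 :: t) ++ [c]).count c0 = (c0 :: t).count c0 + 1 := by
        simp [List.count_append, hc]
      refine ⟨by simp [stepB, hc], ?_, ?_⟩
      · simp only [stepB, if_pos hc]
        rw [hcnt]; omega
      · simp only [stepB, if_pos hc]
        rw [hcnt, List.length_append]
        simp only [List.length_cons, List.length_nil] at *
        omega
    · have hcnt : ((c0 :: t) ++ [c]).count c0 = (c0 :: t).count c0 := by
        simp [List.count_append, List.count_singleton']
        exact hc
      refine ⟨by simp [stepB, hc], ?_, ?_⟩
      · simp only [stepB, if_neg hc]
        rw [hcnt]; omega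
      · simp only [stepB, if_neg hc]
        rw [hcnt, List.length_append]
        simp only [List.length_cons, List.length_nil] at *
        omega

theorem cond_iff (s1 : List Char) (hne : s1 ≠ []) (first : Option Char) (a b : Nat)
    (h : AbsOK s1 first a b) :
    (a = b) ↔ (s1.count (s1.headD ' ') = s1.length - s1.count (s1.headD ' ')) := by
  match s1, hne with
  | c0 :: t, _ =>
    obtain ⟨-, h2, h3⟩ := h
    have hle : (c0 :: t).count c0 ≤ (c0 :: t).length := List.count_le_length
    simp only [List.headD_cons]
    omega

theorem key (k : Nat) : ∀ (cs : List Char) (i : Nat) (s1 : List Char)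
    (first : Option Char) (a b : Nat) (answer : Int),
    cs.length - i ≤ k → i % 2 = 0 → AbsOK s1 first a b →
    solLoopA cs i s1 answer = solLoopB (cs.drop i) i cs.length first a b answer := by
  induction k with
  | zero =>
    intro cs i s1 first a b answer hk _ _
    have hge : cs.length ≤ i := by omega
    rw [solLoopA, dif_neg (by omega), List.drop_eq_nil_of_le hge, solLoopB]
  | succ k ih =>
    intro cs i s1 first a b answer hk hi habs
    by_cases hlt : i < cs.length
    · have hdlen : (cs.drop i).length = cs.length - i := List.length_drop ..
      match hd : cs.drop i with
      | [] => rw [hd] at hdlen; simp at hdlen; omega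
      | [c1] =>
        -- final one-character chunk: i = cs.length - 1
        have hlast : i = cs.length - 1 := by
          rw [hd] at hdlen; simp at hdlen; omega
        have hdrop2 : cs.drop (i + 2) = [] := List.drop_eq_nil_of_le (by omega)
        have habs' := step_abs s1 first a b c1 habs
        have hcond := cond_iff (s1 ++ [c1]) (by simp) _ _ _ habs'
        have htake : (([c1] : List Char)).take 2 = [c1] := rfl
        rw [solLoopA, dif_pos hlt]
        simp only [hd, htake]
        rw [solLoopB]
        rw [if_pos (Or.inr hlast)]
        by_cases heq : (stepB first a b c1).2.1 = (stepB first a b c1).2.2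
        · rw [if_pos (hcond.mp heq), if_pos heq, solLoopB,
            ih cs (i + 2) [] none ((stepB first a b c1).2.1) ((stepB first a b c1).2.2)
              (answer + 1) (by omega) (by omega) rfl, hdrop2, solLoopB]
        · rw [if_neg (fun hcnt => heq (hcond.mpr hcnt)), if_neg heq, if_pos hlast, solLoopB,
            if_pos ⟨by omega, fun hcnt => heq (hcond.mpr hcnt)⟩,
            ih cs (i + 2) (s1 ++ [c1]) (stepB first a b c1).1 ((stepB first a b c1).2.1)
              ((stepB first a b c1).2.2) (answer + 1) (by omega) (by omega) habs', hdrop2,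
            solLoopB]
      | c1 :: c2 :: rest =>
        have hlen2 : cs.length - i ≥ 2 := by
          rw [hd] at hdlen; simp at hdlen; omega
        have hdrop2 : cs.drop (i + 2) = rest := by
          have h2 : cs.drop (i + 2) = (cs.drop i).drop 2 := by
            rw [List.drop_drop]
          rw [h2, hd]
          rfl
        have habs1 := step_abs s1 first a b c1 habs
        have habs2 := step_abs (s1 ++ [c1]) _ _ _ c2 habs1
        rw [List.append_assoc] at habs2
        simp only [List.singleton_append] at habs2
        have hcond := cond_iff (s1 ++ [c1, c2]) (by simp) _ _ _ habs2
        have htake : ((c1 :: c2 :: rest : List Char)).take 2 = [c1, c2] := rfl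
        rw [solLoopA, dif_pos hlt]
        simp only [hd, htake]
        rw [solLoopB]
        rw [if_neg (by omega : ¬(i % 2 = 1 ∨ i = cs.length - 1))]
        rw [solLoopB]
        rw [if_pos (Or.inl (by omega : (i + 1) % 2 = 1))]
        set st2 := stepB (stepB first a b c1).1 (stepB first a b c1).2.1
          (stepB first a b c1).2.2 c2 with hst2
        by_cases heq : st2.2.1 = st2.2.2
        · rw [if_pos (hcond.mp heq), if_pos heq,
            ih cs (i + 2) [] none st2.2.1 st2.2.2 (answer + 1) (by omega) (by omega) rfl,
            hdrop2]
        · rw [if_neg (fun hcnt => heq (hcond.mpr hcnt)), if_neg heq]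
          have hiff : (i + 1 = cs.length - 1) ↔ (cs.length - 2 ≤ i) := by omega
          by_cases hend : i + 1 = cs.length - 1
          · rw [if_pos hend,
              if_pos ⟨hiff.mp hend, fun hcnt => heq (hcond.mpr hcnt)⟩,
              ih cs (i + 2) (s1 ++ [c1, c2]) st2.1 st2.2.1 st2.2.2 (answer + 1)
                (by omega) (by omega) habs2, hdrop2]
          · rw [if_neg hend,
              if_neg (fun hc => hend (hiff.mpr hc.1)),
              ih cs (i + 2) (s1 ++ [c1, c2]) st2.1 st2.2.1 st2.2.2 answer
                (by omega) (by omega) habs2, hdrop2]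
    · rw [solLoopA, dif_neg hlt, List.drop_eq_nil_of_le (by omega), solLoopB]

-- ===== VERDICT (by name: the statement is the Claim_ definition above) =====
theorem solution_spec : Claim_equal_solution := by
  intro s _
  unfold Spec_solution solution solution_alt
  exact key s.toList.length s.toList 0 [] none 0 0 0 (by omega) (by omega) rfl
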